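-- pv_equiv track=rewrite | github.com/vkiran23/Python-Scripts | factorial.py | factorial_between_range
-- ===== SOURCE A (Python) =====
-- def factorial_between_range(start, end):
--     """
--     Calculates factorials for numbers within a given range.
--
--     Args:
--     start (int): The starting value of the range.
--     end (int): The ending value of the range.
--
--     Returns:
--     str: A formatted string showing the factorials for each number within the given range.
--     """
--     fact_list = []
--     for i in range(start, end + 1):
--         factorial_result = 1
--         for j in range(1, i + 1):
--             factorial_result *= j
--         fact_list.append((i, factorial_result))
--     return f'Factorials between {start} and {end} are: {fact_list}'
-- ===== SOURCE B (Python) =====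
-- def factorial_between_range(start, end):
--     """Same output as A, via an incremental running product instead of a per-number inner loop."""
--     fact_list = []
--     if start <= end:
--         f = 1
--         for j in range(2, start):  # f = (start-1)! when start >= 1, else 1
--             f *= j
--         for i in range(start, end + 1):
--             if i >= 1:
--                 f *= i
--             fact_list.append((i, f))
--     return f'Factorials between {start} and {end} are: {fact_list}'
-- ===== Notes on version B (the rewrite author's own statement) =====
-- stated objective: alternative
-- what changed: Replaced the per-number inner factorial loop by a single incremental running product (f *= i each step, after one seeding product for (start-1)!), so the nested rescan of 1..i disappears; measured wall time is dominated by big-int arithmetic and formatting, so no speed is claimed.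
import Mathlib
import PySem

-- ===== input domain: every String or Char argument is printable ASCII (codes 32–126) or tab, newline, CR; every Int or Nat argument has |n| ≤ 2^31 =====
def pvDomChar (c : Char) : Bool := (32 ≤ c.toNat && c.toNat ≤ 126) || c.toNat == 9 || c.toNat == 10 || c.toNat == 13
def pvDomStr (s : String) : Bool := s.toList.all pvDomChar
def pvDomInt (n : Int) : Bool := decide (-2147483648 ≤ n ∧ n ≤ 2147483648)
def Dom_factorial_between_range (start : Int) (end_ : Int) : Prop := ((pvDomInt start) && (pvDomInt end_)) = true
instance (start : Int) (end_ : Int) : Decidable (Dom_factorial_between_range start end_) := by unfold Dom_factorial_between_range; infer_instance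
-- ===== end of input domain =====

-- B replaces A's per-number inner factorial loop by one incremental running product (a different algorithm; no speed is claimed).

-- ===== PORT A =====
-- A's f-string: f'Factorials between {start} and {end} are: {fact_list}' (list-of-int-pairs repr)
def pvFormat (start : Int) (end_ : Int) (l : List (Int × Int)) : String :=
  PySem.Str.join "" ["Factorials between ", PySem.Int.toStr start, " and ", PySem.Int.toStr end_,
    " are: [",
    PySem.Str.join ", " (l.map fun p => PySem.Str.join "" ["(", PySem.Int.toStr p.1, ", ", PySem.Int.toStr p.2, ")"]),
    "]"]
def factorial_between_range (start : Int) (end_ : Int) : String :=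
  let fact_list := (PySem.List.pyRange start (end_ + 1)).foldl
    (fun l i => l ++ [(i, (PySem.List.pyRange 1 (i + 1)).foldl (fun acc j => acc * j) 1)]) []
  pvFormat start end_ fact_list

-- ===== PORT B =====
-- B's copy of the same f-string formatting (kept separate so each port is self-contained)
def pvFormatB (start : Int) (end_ : Int) (l : List (Int × Int)) : String :=
  PySem.Str.join "" ["Factorials between ", PySem.Int.toStr start, " and ", PySem.Int.toStr end_,
    " are: [",
    PySem.Str.join ", " (l.map fun p => PySem.Str.join "" ["(", PySem.Int.toStr p.1, ", ", PySem.Int.toStr p.2, ")"]),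
    "]"]

-- the body of B's loop: 'if i >= 1: f *= i; fact_list.append((i, f))'
def pvStepB (st : List (Int × Int) × Int) (i : Int) : List (Int × Int) × Int :=
  let f := if 1 ≤ i then st.2 * i else st.2
  (st.1 ++ [(i, f)], f)

def factorial_between_range_alt (start : Int) (end_ : Int) : String :=
  let fact_list :=
    if start ≤ end_ then
      let f0 := (PySem.List.pyRange 2 start).foldl (fun acc j => acc * j) 1
      ((PySem.List.pyRange start (end_ + 1)).foldl pvStepB ([], f0)).1
    else []
  pvFormatB start end_ fact_list

-- ===== PRECONDITION & SPEC =====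
def Spec_factorial_between_range (start : Int) (end_ : Int) (out : String) : Prop := out = factorial_between_range_alt start end_
instance (start : Int) (end_ : Int) (out : String) : Decidable (Spec_factorial_between_range start end_ out) := by unfold Spec_factorial_between_range; infer_instance

-- ===== CLAIM (what is proved, stated in full; the proofs are below) =====
def Claim_equal_factorial_between_range : Prop := ∀ (start : Int) (end_ : Int), Dom_factorial_between_range start end_ → Spec_factorial_between_range start end_ (factorial_between_range start end_)

-- ===== LEMMAS AND PROOFS =====

/-- A's inner-loop factorial of `i` (the value A pairs with `i`). -/
def pvG (i : Int) : Int := (PySem.List.pyRange 1 (i + 1)).foldl (fun acc j => acc * j) 1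

theorem pvG_nonpos {i : Int} (h : i ≤ 0) : pvG i = 1 := by
  have h0 : i.toNat = 0 := by omega
  simp [pvG, PySem.List.pyRange_one, h0]

theorem pvG_succ {i : Int} (h : 1 ≤ i) : pvG i = pvG (i - 1) * i := by
  unfold pvG
  rw [PySem.List.pyRange_one_succ_right h]
  simp [List.foldl_append]

theorem pvSeed (start : Int) :
    (PySem.List.pyRange 2 start).foldl (fun acc j => acc * j) 1 = pvG (start - 1) := by
  by_cases h : start ≤ 1
  · have h0 : (start - 2).toNat = 0 := by omega
    rw [pvG_nonpos (by omega)]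
    simp [PySem.List.pyRange_one, h0]
  · have hc : (1 : Int) < start := by omega
    have h1 : pvG (start - 1) = (PySem.List.pyRange 1 start).foldl (fun acc j => acc * j) 1 := by
      unfold pvG; norm_num
    rw [h1, PySem.List.pyRange_one_cons hc]
    simp

theorem pvLoop (n : Nat) (a : Int) (acc : List (Int × Int)) (f : Int) (hf : f = pvG (a - 1)) :
    (PySem.List.pyRange a (a + n)).foldl pvStepB (acc, f)
    = (acc ++ (PySem.List.pyRange a (a + n)).map (fun i => (i, pvG i)), pvG (a - 1 + n)) := by
  induction n generalizing acc f with
  | zero =>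
    have he : a + ((0 : Nat) : Int) = a := by simp
    rw [he]
    have h0 : (a - a).toNat = 0 := by omega
    simp [hf]
  | succ n ih =>
    have he : a + ((n + 1 : Nat) : Int) = (a + n) + 1 := by push_cast; ring
    rw [he, PySem.List.pyRange_one_succ_right (by omega : a ≤ a + (n : Int))]
    rw [List.foldl_append, ih acc f hf, List.map_append]
    have hval : pvStepB (acc ++ (PySem.List.pyRange a (a + n)).map (fun i => (i, pvG i)), pvG (a - 1 + n)) (a + n)
        = (acc ++ ((PySem.List.pyRange a (a + n)).map (fun i => (i, pvG i)) ++ [(a + (n : Int), pvG (a + n))]), pvG (a - 1 + ((n : Nat) + 1 : Nat))) := by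
      unfold pvStepB
      have hg : (if 1 ≤ a + (n : Int) then pvG (a - 1 + n) * (a + n) else pvG (a - 1 + n)) = pvG (a + (n : Int)) := by
        split_ifs with hle
        · rw [pvG_succ hle]; ring_nf
        · rw [pvG_nonpos (by omega), pvG_nonpos (by omega)]
      have hi : a - 1 + ((n : Nat) + 1 : Nat) = a + (n : Int) := by push_cast; ring
      simp only [hg, hi, List.append_assoc]
    simp only [List.foldl_cons, List.foldl_nil]
    rw [hval]
    simp

theorem pvLists (start end_ : Int) :
    ((PySem.List.pyRange start (end_ + 1)).foldl
      (fun l i => l ++ [(i, (PySem.List.pyRange 1 (i + 1)).foldl (fun acc j => acc * j) 1)]) [])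
    = (if start ≤ end_ then
        ((PySem.List.pyRange start (end_ + 1)).foldl pvStepB
          ([], (PySem.List.pyRange 2 start).foldl (fun acc j => acc * j) 1)).1
       else []) := by
  by_cases h : start ≤ end_
  · rw [if_pos h]
    have he : end_ + 1 = start + ((end_ + 1 - start).toNat : Int) := by omega
    rw [he, PySem.List.foldl_append_singleton_eq_map
          (fun i => (i, (PySem.List.pyRange 1 (i + 1)).foldl (fun acc j => acc * j) 1)),
        pvSeed, pvLoop ((end_ + 1 - start).toNat) start [] _ rfl]
    simp [pvG]
  · rw [if_neg h]
    have h0 : (end_ + 1 - start).toNat = 0 := by omega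
    rw [PySem.List.pyRange_one start (end_ + 1)]
    simp [h0]

-- ===== VERDICT (by name: the statement is the Claim_ definition above) =====
theorem factorial_between_range_spec : Claim_equal_factorial_between_range := by
  intro start end_ _
  unfold Spec_factorial_between_range factorial_between_range factorial_between_range_alt
  rw [pvLists]
  simp [pvFormat, pvFormatB]
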